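-- pv_equiv track=rewrite | github.com/ANicolleau/methodo_test_exam | ex_3/auto_return.py | auto_return_v3
-- ===== SOURCE A (Python) =====
-- SEPARATOR = [' ', ',', '.']
--
-- def get_int_nearest(index, integers, added_return):
--     nearest_integer = 0
--
--     for integer in integers:
--         if integer < index and nearest_integer >= (integer - index):
--             nearest_integer = integer
--     return nearest_integer
--
-- def auto_return_v3(string, string_length):
--     if not isinstance(string, str):
--         return None
--     if not isinstance(string_length, int):
--         return None
--     string = [char for char in string]
--     added_return = []
--     index_space = [index for index, char in enumerate(string) if char in SEPARATOR]
--     for char_id, char in enumerate(string[:]):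
--         if char_id + 1 == string_length or ((char_id + 1) % string_length) == 0:
--             if char_id + 1 not in SEPARATOR:
--                 return_to_index = get_int_nearest(char_id + 1, index_space, added_return)
--                 string[return_to_index] = '\n'
--                 added_return.append(return_to_index)
--             else:
--                 string[char_id + 1] = '\n'
--     string = ''.join(string)
--     return string
-- ===== SOURCE B (Python) =====
-- SEPARATOR = [' ', ',', '.']
--
-- def auto_return_v3(string, string_length):
--     if not isinstance(string, str):
--         return None
--     if not isinstance(string_length, int):
--         return None
--     n = len(string)
--     out = list(string)
--     if n > 0:
--         seps = [i for i, ch in enumerate(string) if ch in SEPARATOR]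
--         step = abs(string_length)
--         last = 0
--         si = 0
--         ns = len(seps)
--         for m in range(step, n + 1, step):
--             while si < ns and seps[si] < m:
--                 last = seps[si]
--                 si += 1
--             out[last] = '\n'
--     return ''.join(out)
-- ===== Notes on version B (the rewrite author's own statement) =====
-- stated objective: faster
-- what changed: A precomputes the list of all separator indices and, at every line boundary, rescans that whole list (get_int_nearest) to find the last separator before the boundary, inside a per-character loop; B computes the boundary positions arithmetically (range(step, n+1, step) with step=abs(string_length)) and walks the sorted separator-index list once with a two-pointer scan, so each separator index is visited once.
import Mathlib
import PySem

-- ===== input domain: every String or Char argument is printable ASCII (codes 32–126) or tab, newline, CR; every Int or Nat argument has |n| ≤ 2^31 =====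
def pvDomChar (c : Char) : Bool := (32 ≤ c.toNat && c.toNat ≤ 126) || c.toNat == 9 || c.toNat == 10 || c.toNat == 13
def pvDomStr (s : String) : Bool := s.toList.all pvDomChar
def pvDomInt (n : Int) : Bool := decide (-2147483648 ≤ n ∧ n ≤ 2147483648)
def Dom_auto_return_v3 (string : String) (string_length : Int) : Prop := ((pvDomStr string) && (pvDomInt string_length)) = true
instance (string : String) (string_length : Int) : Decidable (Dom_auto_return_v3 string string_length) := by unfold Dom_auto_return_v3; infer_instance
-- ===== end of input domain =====

-- B replaces A's per-boundary rescan of the separator-index list by a two-pointer walk over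
-- the arithmetic boundary positions (objective: faster). Return values only; neither Python
-- mutates its arguments.

def SEPARATOR : List Char := [' ', ',', '.']

-- ===== PORT A =====
def get_int_nearest (index : Int) (integers : List Int) (added_return : List Int) : Int :=
  -- added_return is a parameter of the Python function but is never read by it
  integers.foldl
    (fun nearest_integer integer =>
      if integer < index ∧ nearest_integer ≥ integer - index then integer else nearest_integer)
    0

-- the main 'for char_id, char in enumerate(string[:])' loop, state = (string, added_return);
-- 'char_id + 1 not in SEPARATOR' is always True in Python (an int is never equal to a str),
-- so only that branch is ported
def autoLoopA (string_length : Int) (index_space : List Int) :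
    List (Int × Char) → List Char × List Int → List Char × List Int
  | [], st => st
  | (char_id, _) :: rest, (s, added_return) =>
    if char_id + 1 = string_length ∨ PySem.Int.mod (char_id + 1) string_length = 0 then
      let return_to_index := get_int_nearest (char_id + 1) index_space added_return
      autoLoopA string_length index_space rest
        (PySem.List.pySetD s return_to_index '\n', added_return ++ [return_to_index])
    else
      autoLoopA string_length index_space rest (s, added_return)

def auto_return_v3 (string : String) (string_length : Int) : Option String :=
  -- the two isinstance guards always pass under these types;
  -- ZeroDivisionError of '(char_id + 1) % 0' (reached iff string_length = 0 and the loop runs,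
  -- i.e. string ≠ "") is hoisted into this totality guard; excluded by Pre_
  if string_length = 0 ∧ string ≠ "" then none
  else
    let chars := string.toList
    let index_space := (PySem.List.enumerate chars).filterMap
      (fun p => if p.2 ∈ SEPARATOR then some p.1 else none)
    some (String.ofList (autoLoopA string_length index_space (PySem.List.enumerate chars) (chars, [])).1)

-- ===== PORT B =====
-- Source B's 'while si < ns and seps[si] < m: last = seps[si]; si += 1', ported as recursion on
-- the remaining suffix seps[si:] (si advances ⇔ the suffix shrinks); returns (last, suffix)
def bWhile (m : Int) : List Int → Int → Int × List Int
  | [], last => (last, [])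
  | x :: rest, last => if x < m then bWhile m rest x else (last, x :: rest)

-- Source B's 'for m in range(step, n + 1, step)' loop; 'out[last] = chr(10)' is an in-range
-- nonnegative index assignment, exactly PySem.List.pySetD
def bLoop : List Int → List Char → Int → List Int → List Char
  | [], out, _, _ => out
  | m :: ms, out, last, seps =>
    match bWhile m seps last with
    | (last', seps') => bLoop ms (PySem.List.pySetD out last' '\n') last' seps'

def auto_return_v3_alt (string : String) (string_length : Int) : Option String :=
  -- same isinstance guards; here string_length = 0 with a nonempty string makes
  -- 'range(0, n+1, 0)' raise ValueError — hoisted into the same totality guard, outside Pre_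
  if string_length = 0 ∧ string ≠ "" then none
  else
    let n : Int := (string.toList.length : Int)
    let out := string.toList
    if 0 < n then
      let seps := (PySem.List.enumerate string.toList).filterMap
        (fun p => if p.2 ∈ SEPARATOR then some p.1 else none)
      let step := |string_length|
      some (String.ofList (bLoop (PySem.List.pyRange step (n + 1) step) out 0 seps))
    else some (String.ofList out)

-- ===== PRECONDITION & SPEC =====
-- Pre_ excludes exactly the inputs where the Python A raises ZeroDivisionError:
-- string_length = 0 with a nonempty string ('(char_id+1) % 0' on the first iteration).
def Pre_auto_return_v3 (string : String) (string_length : Int) : Prop :=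
  string_length ≠ 0 ∨ string = ""

instance (string : String) (string_length : Int) : Decidable (Pre_auto_return_v3 string string_length) := by
  unfold Pre_auto_return_v3; infer_instance

def pvWitness_auto_return_v3 : String × Int := ("hello world, this is fine", 7)

def Spec_auto_return_v3 (string : String) (string_length : Int) (out : Option String) : Prop := out = auto_return_v3_alt string string_length
instance (string : String) (string_length : Int) (out : Option String) : Decidable (Spec_auto_return_v3 string string_length out) := by unfold Spec_auto_return_v3; infer_instance

-- ===== CLAIM (what is proved, stated in full; the proofs are below) =====
def Claim_equal_auto_return_v3 : Prop := ∀ (string : String) (string_length : Int), Dom_auto_return_v3 string string_length → Pre_auto_return_v3 string string_length → Spec_auto_return_v3 string string_length (auto_return_v3 string string_length)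

-- ===== LEMMAS AND PROOFS =====

theorem pvWitness_ok :
    Dom_auto_return_v3 pvWitness_auto_return_v3.1 pvWitness_auto_return_v3.2 ∧
    Pre_auto_return_v3 pvWitness_auto_return_v3.1 pvWitness_auto_return_v3.2 := by
  constructor <;> decide

-- abbreviations used only by the proofs

-- the boundary predicate A's loop tests
def trig (L m : Int) : Bool := decide (m = L ∨ PySem.Int.mod m L = 0)

-- 'last separator index < m' with default 0 (the value get_int_nearest computes)
def gval (idx : List Int) (m : Int) : Int := (idx.filter (fun x => x < m)).getLastD 0

-- the list of positions A overwrites, in loop order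
def marksA (L : Int) (idx : List Int) (ps : List (Int × Char)) : List Int :=
  ps.filterMap (fun p => if trig L (p.1 + 1) then some (gval idx (p.1 + 1)) else none)

-- get_int_nearest's fold, with nonnegative init and elements, keeps the last element < m
theorem gfold (m : Int) : ∀ (idx : List Int) (a : Int), 0 ≤ a → (∀ x ∈ idx, 0 ≤ x) →
    idx.foldl (fun n i => if i < m ∧ n ≥ i - m then i else n) a
      = (idx.filter (fun x => x < m)).getLastD a := by
  intro idx
  induction idx with
  | nil => intro a _ _; rfl
  | cons x rest ih =>
    intro a ha hnn
    have hx0 : (0:Int) ≤ x := hnn x (by simp)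
    by_cases hx : x < m
    · have hc : (if x < m ∧ a ≥ x - m then x else a) = x := if_pos ⟨hx, by omega⟩
      simp only [List.foldl_cons, hc, List.filter_cons, decide_eq_true_eq, if_pos hx,
        List.getLastD_cons]
      exact ih x hx0 (fun y hy => hnn y (by simp [hy]))
    · have hc : (if x < m ∧ a ≥ x - m then x else a) = a := by
        rw [if_neg]; intro h; exact hx h.1
      simp only [List.foldl_cons, hc, List.filter_cons, decide_eq_true_eq, if_neg hx]
      exact ih a ha (fun y hy => hnn y (by simp [hy]))

theorem get_int_nearest_eq_gval (m : Int) (idx ar : List Int)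
    (hnn : ∀ x ∈ idx, 0 ≤ x) : get_int_nearest m idx ar = gval idx m :=
  gfold m idx 0 le_rfl hnn

-- A's loop is a fold of pySetD over the marksA positions
theorem autoLoopA_fst (L : Int) (idx : List Int) (hnn : ∀ x ∈ idx, 0 ≤ x) :
    ∀ (ps : List (Int × Char)) (s : List Char) (ar : List Int),
      (autoLoopA L idx ps (s, ar)).1 =
        (marksA L idx ps).foldl (fun s r => PySem.List.pySetD s r '\n') s := by
  intro ps
  induction ps with
  | nil => intro s ar; rfl
  | cons p rest ih =>
    intro s ar
    obtain ⟨char_id, c⟩ := p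
    by_cases ht : trig L (char_id + 1) = true
    · have ht' : char_id + 1 = L ∨ PySem.Int.mod (char_id + 1) L = 0 := of_decide_eq_true ht
      rw [autoLoopA, if_pos ht']
      rw [ih]
      unfold marksA
      rw [List.filterMap_cons]
      simp only [if_pos ht, List.foldl_cons,
        get_int_nearest_eq_gval (char_id + 1) idx ar hnn]
    · have ht' : ¬ (char_id + 1 = L ∨ PySem.Int.mod (char_id + 1) L = 0) :=
        fun hor => ht (decide_eq_true hor)
      rw [autoLoopA, if_neg ht']
      rw [ih]
      unfold marksA
      rw [List.filterMap_cons]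
      simp only [if_neg ht]

-- two strictly increasing integer lists with the same members are equal
theorem sorted_mem_ext : ∀ (l1 l2 : List Int), l1.Pairwise (· < ·) → l2.Pairwise (· < ·) →
    (∀ x, x ∈ l1 ↔ x ∈ l2) → l1 = l2 := by
  intro l1
  induction l1 with
  | nil =>
    intro l2 _ _ hiff
    cases l2 with
    | nil => rfl
    | cons y l2 => exact absurd ((hiff y).mpr (by simp)) (by simp)
  | cons x l1 ih =>
    intro l2 hp1 hp2 hiff
    cases l2 with
    | nil => exact absurd ((hiff x).mp (by simp)) (by simp)
    | cons y l2 =>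
      have hx1 : ∀ z ∈ l1, x < z := fun z hz => (List.pairwise_cons.mp hp1).1 z hz
      have hy2 : ∀ z ∈ l2, y < z := fun z hz => (List.pairwise_cons.mp hp2).1 z hz
      have hxy : x = y := by
        rcases List.mem_cons.mp ((hiff x).mp (by simp)) with h | h
        · exact h
        · rcases List.mem_cons.mp ((hiff y).mpr (by simp)) with h' | h'
          · omega
          · have := hx1 y h'
            have := hy2 x h
            omega
      subst hxy
      have htail : ∀ z, z ∈ l1 ↔ z ∈ l2 := by
        intro z
        constructor
        · intro hz
          have hzx := hx1 z hz
          rcases List.mem_cons.mp ((hiff z).mp (List.mem_cons_of_mem _ hz)) with h | h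
          · omega
          · exact h
        · intro hz
          have hzy := hy2 z hz
          rcases List.mem_cons.mp ((hiff z).mpr (List.mem_cons_of_mem _ hz)) with h | h
          · omega
          · exact h
      rw [ih l2 (List.pairwise_cons.mp hp1).2 (List.pairwise_cons.mp hp2).2 htail]

-- filterMap of an 'if P then some (f m) else none' is map-after-filter
theorem filterMap_ite_eq_map_filter {α : Type} (P : Int → Bool)
    (f : Int → α) : ∀ (l : List Int),
    l.filterMap (fun m => if P m then some (f m) else none) = (l.filter (fun m => P m)).map f := by
  intro l
  induction l with
  | nil => rfl
  | cons x rest ih =>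
    rw [List.filterMap_cons, List.filter_cons]
    by_cases h : P x = true
    · simp only [if_pos h, List.map_cons, ih]
    · simp only [if_neg h, ih]

theorem getLastD_append' {α : Type} (d : α) (a b : List α) :
    (a ++ b).getLastD d = b.getLastD (a.getLastD d) := by
  cases b with
  | nil => simp
  | cons y bs =>
    rw [List.getLastD_eq_getLast?, List.getLastD_eq_getLast? (l := y :: bs),
      List.getLast?_append]
    cases h : (y :: bs).getLast? with
    | none => simp at h
    | some z => rfl

-- splitting a sorted list's filter below m at a cursor c ≤ m
theorem filter_split (c m : Int) (hcm : c ≤ m) : ∀ (l : List Int), l.Pairwise (· < ·) →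
    l.filter (fun x => x < m) =
      l.filter (fun x => x < c) ++ (l.filter (fun x => ¬ x < c)).filter (fun x => x < m) := by
  intro l
  induction l with
  | nil => simp
  | cons x rest ih =>
    intro hpw
    have hlt : ∀ y ∈ rest, x < y := fun y hy => (List.pairwise_cons.mp hpw).1 y hy
    have hih := ih (List.pairwise_cons.mp hpw).2
    by_cases h : x < c
    · rw [List.filter_cons_of_pos (by simp; omega), List.filter_cons_of_pos (by simpa using h),
        List.filter_cons_of_neg (by simp; omega), hih, List.cons_append]
    · have hkeep : (x :: rest).filter (fun y => ¬ y < c) = x :: rest :=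
        List.filter_eq_self.mpr (fun y hy => by
          rcases List.mem_cons.mp hy with rfl | hm
          · simp; omega
          · have := hlt y hm; simp; omega)
      have hnone : (x :: rest).filter (fun y => y < c) = [] :=
        List.filter_eq_nil_iff.mpr (fun y hy => by
          rcases List.mem_cons.mp hy with rfl | hm
          · simp; omega
          · have := hlt y hm; simp; omega)
      rw [hnone, hkeep, List.nil_append]

theorem gval_split (idx : List Int) (hpw : idx.Pairwise (· < ·)) (c m : Int) (hcm : c ≤ m) :
    gval idx m = ((idx.filter (fun x => ¬ x < c)).filter (fun x => x < m)).getLastD (gval idx c) := by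
  unfold gval
  rw [filter_split c m hcm idx hpw, getLastD_append']

-- the two-pointer while-loop on a sorted suffix
theorem bWhile_eq (m : Int) : ∀ (rem : List Int) (last : Int), rem.Pairwise (· < ·) →
    bWhile m rem last = ((rem.filter (fun x => x < m)).getLastD last,
      rem.filter (fun x => ¬ x < m)) := by
  intro rem
  induction rem with
  | nil => intro last _; rfl
  | cons x rest ih =>
    intro last hpw
    have hlt : ∀ y ∈ rest, x < y := fun y hy => (List.pairwise_cons.mp hpw).1 y hy
    by_cases hx : x < m
    · rw [bWhile, if_pos hx, ih x (List.pairwise_cons.mp hpw).2,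
        List.filter_cons_of_pos (by simpa using hx),
        List.filter_cons_of_neg (by simpa using hx), List.getLastD_cons]
    · have h1 : rest.filter (fun y => decide (y < m)) = [] :=
        List.filter_eq_nil_iff.mpr (fun y hy => by have := hlt y hy; simp; omega)
      have h2 : rest.filter (fun y => decide (¬ y < m)) = rest :=
        List.filter_eq_self.mpr (fun y hy => by have := hlt y hy; simp; omega)
      rw [bWhile, if_neg hx, List.filter_cons_of_neg (by simpa using hx),
        List.filter_cons_of_pos (by simpa using hx), h1, h2]
      rfl

-- B's boundary loop is the fold of pySetD over the gval positions
theorem bLoop_eq (idx : List Int) (hpw : idx.Pairwise (· < ·)) :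
    ∀ (ms : List Int) (out : List Char) (c : Int),
      ms.Pairwise (· ≤ ·) → (∀ m ∈ ms, c ≤ m) →
      bLoop ms out (gval idx c) (idx.filter (fun x => ¬ x < c)) =
        (ms.map (gval idx)).foldl (fun s r => PySem.List.pySetD s r '\n') out := by
  intro ms
  induction ms with
  | nil => intro out c _ _; rfl
  | cons m ms ih =>
    intro out c hpw2 hge
    have hcm : c ≤ m := hge m (by simp)
    have hrempw : (idx.filter (fun x => ¬ x < c)).Pairwise (· < ·) := hpw.filter _
    rw [bLoop, bWhile_eq m _ _ hrempw]
    have hlast : ((idx.filter (fun x => ¬ x < c)).filter (fun x => x < m)).getLastD (gval idx c)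
        = gval idx m := (gval_split idx hpw c m hcm).symm
    have hrem : (idx.filter (fun x => ¬ x < c)).filter (fun x => ¬ x < m)
        = idx.filter (fun x => ¬ x < m) := by
      rw [List.filter_filter]
      apply List.filter_congr
      intro x _
      simp
      omega
    rw [hlast, hrem, List.map_cons, List.foldl_cons]
    exact ih (PySem.List.pySetD out (gval idx m) '\n') m
      (List.pairwise_cons.mp hpw2).2
      (fun m' hm' => (List.pairwise_cons.mp hpw2).1 m' hm')

-- membership in B's boundary range: the multiples of step in [1, n]
theorem mem_boundaries (step n x : Int) (hstep : 0 < step) (hn : 0 ≤ n) :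
    x ∈ PySem.List.pyRange step (n + 1) step ↔ 1 ≤ x ∧ x < n + 1 ∧ step ∣ x := by
  unfold PySem.List.pyRange
  rw [if_neg (by omega)]
  simp only [if_pos hstep]
  by_cases hsn : step < n + 1
  · rw [if_pos hsn]
    have harith : n + 1 - step + step - 1 = n := by ring
    rw [harith]
    simp only [List.mem_map, List.mem_range]
    constructor
    · rintro ⟨k, hk, rfl⟩
      have hk' : (k : Int) + 1 ≤ n / step := by
        have : (k : Int) < (n / step).toNat := by exact_mod_cast hk
        omega
      have hle : ((k : Int) + 1) * step ≤ n := (Int.le_ediv_iff_mul_le hstep).mp hk'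
      refine ⟨by nlinarith, by nlinarith, ⟨k + 1, by ring⟩⟩
    · rintro ⟨hx1, hxn, j, rfl⟩
      have hj1 : 1 ≤ j := by nlinarith
      refine ⟨(j - 1).toNat, ?_, ?_⟩
      · have : j ≤ n / step := (Int.le_ediv_iff_mul_le hstep).mpr (by nlinarith)
        omega
      · have : ((j - 1).toNat : Int) = j - 1 := by omega
        rw [this]; ring
  · rw [if_neg hsn]
    simp only [List.range_zero, List.map_nil, List.not_mem_nil, false_iff]
    rintro ⟨hx1, hxn, hdvd⟩
    have := Int.le_of_dvd (by omega) hdvd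
    omega

theorem boundaries_pairwise (step n : Int) (hstep : 0 < step) :
    (PySem.List.pyRange step (n + 1) step).Pairwise (· < ·) := by
  unfold PySem.List.pyRange
  rw [if_neg (by omega)]
  simp only [if_pos hstep]
  split_ifs <;>
    · rw [List.pairwise_map]
      apply List.Pairwise.imp _ List.pairwise_lt_range
      intro a b hab
      have : (a : Int) < b := by exact_mod_cast hab
      nlinarith

-- the trigger predicate is divisibility by |L| on positive positions
theorem trig_iff_dvd (L x : Int) (hL : L ≠ 0) (hx : 1 ≤ x) : trig L x = true ↔ |L| ∣ x := by
  unfold trig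
  rw [decide_eq_true_eq, PySem.Int.mod_eq_zero_iff_dvd, abs_dvd]
  constructor
  · rintro (rfl | h)
    · exact dvd_refl x
    · exact h
  · exact Or.inr

-- properties of A's index_space
theorem index_space_pairwise (chars : List Char) :
    ((PySem.List.enumerate chars 0).filterMap
      (fun p => if p.2 ∈ SEPARATOR then some p.1 else none)).Pairwise (· < ·) := by
  rw [List.pairwise_filterMap]
  apply List.Pairwise.imp _ (PySem.List.pairwise_lt_enumerate chars 0)
  intro a b hab x hx y hy
  have hxa : x = a.1 := by by_cases h : a.2 ∈ SEPARATOR <;> simp [h] at hx; omega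
  have hyb : y = b.1 := by by_cases h : b.2 ∈ SEPARATOR <;> simp [h] at hy; omega
  omega

theorem index_space_nonneg (chars : List Char) :
    ∀ x ∈ (PySem.List.enumerate chars 0).filterMap
      (fun p => if p.2 ∈ SEPARATOR then some p.1 else none), 0 ≤ x := by
  intro x hx
  rw [List.mem_filterMap] at hx
  obtain ⟨p, hp, hpx⟩ := hx
  rw [PySem.List.mem_enumerate_iff] at hp
  obtain ⟨k, hk, rfl⟩ := hp
  by_cases h : chars[k] ∈ SEPARATOR
  · simp [h] at hpx
    omega
  · simp [h] at hpx

-- A's marked positions, re-indexed over the boundary range m = 1..n and then restricted to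
-- the triggered boundaries
theorem marksA_eq_map (L : Int) (idx : List Int) (chars : List Char) :
    marksA L idx (PySem.List.enumerate chars 0) =
      ((PySem.List.pyRange 1 ((chars.length : Int) + 1) 1).filter
        (fun m => trig L m)).map (gval idx) := by
  unfold marksA
  rw [PySem.List.enumerate_eq_map_pyRange chars ' ', List.filterMap_map,
    ← filterMap_ite_eq_map_filter (trig L) (gval idx),
    PySem.List.pyRange_one, PySem.List.pyRange_one, List.filterMap_map, List.filterMap_map,
    show (((chars.length : Int) + 1 - 1).toNat) = ((PySem.List.len chars - 0).toNat) by
      simp [PySem.List.len]]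
  apply List.filterMap_congr
  intro k _
  show (if trig L (0 + (k : Int) + 1) then some (gval idx (0 + (k : Int) + 1)) else none)
      = (if trig L (1 + (k : Int)) then some (gval idx (1 + (k : Int))) else none)
  rw [show (0 : Int) + (k : Int) + 1 = 1 + (k : Int) by ring]

-- ===== VERDICT (by name: the statement is the Claim_ definition above) =====
theorem auto_return_v3_spec : Claim_equal_auto_return_v3 := by
  intro string string_length _ hpre
  unfold Spec_auto_return_v3 auto_return_v3 auto_return_v3_alt
  by_cases hg : string_length = 0 ∧ string ≠ ""
  · simp only [if_pos hg]
  · simp only [if_neg hg]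
    set chars := string.toList with hchars
    by_cases hn : (0 : Int) < (chars.length : Int)
    · rw [if_pos hn]
      have hne : string ≠ "" := by
        intro h
        have hl0 : chars.length = 0 := by rw [hchars, h]; rfl
        omega
      have hL : string_length ≠ 0 := by
        rcases hpre with h | h
        · exact h
        · exact absurd h hne
      set idx := (PySem.List.enumerate chars 0).filterMap
        (fun p => if p.2 ∈ SEPARATOR then some p.1 else none) with hidx
      have hpw := index_space_pairwise chars
      have hnn := index_space_nonneg chars
      have hstep : (0 : Int) < |string_length| := by positivity
      -- B's loop = fold over boundary gvals
      have hg0 : (0 : Int) = gval idx 0 := by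
        unfold gval
        have : idx.filter (fun x => x < 0) = [] :=
          List.filter_eq_nil_iff.mpr (fun y hy => by simp; exact hnn y hy)
        rw [this]; rfl
      have hrem0 : idx.filter (fun x => ¬ x < 0) = idx :=
        List.filter_eq_self.mpr (fun y hy => by simp; exact hnn y hy)
      have hBpw := boundaries_pairwise |string_length| (chars.length : Int) hstep
      have hB := bLoop_eq idx hpw
        (PySem.List.pyRange |string_length| ((chars.length : Int) + 1) |string_length|)
        chars 0 (hBpw.imp (fun h => le_of_lt h))
        (fun m hm => by
          have := (mem_boundaries _ _ m hstep (by omega)).mp hm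
          omega)
      rw [← hg0, hrem0] at hB
      -- A's loop = fold over triggered gvals
      rw [autoLoopA_fst string_length idx hnn, hB]
      -- the two position lists coincide
      have hlists : (PySem.List.pyRange 1 ((chars.length : Int) + 1) 1).filter
            (fun m => trig string_length m)
          = PySem.List.pyRange |string_length| ((chars.length : Int) + 1) |string_length| := by
        apply sorted_mem_ext
        · exact (PySem.List.pairwise_lt_pyRange_one 1 _).filter _
        · exact hBpw
        · intro x
          rw [List.mem_filter, PySem.List.mem_pyRange_one,
            mem_boundaries _ _ x hstep (by omega)]
          constructor
          · rintro ⟨⟨h1, h2⟩, ht⟩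
            exact ⟨h1, h2, (trig_iff_dvd string_length x hL h1).mp (by simpa using ht)⟩
          · rintro ⟨h1, h2, hd⟩
            exact ⟨⟨h1, h2⟩, by
              simpa using (trig_iff_dvd string_length x hL h1).mpr hd⟩
      rw [marksA_eq_map, hlists]
    · rw [if_neg hn]
      have hnil : chars = [] := List.eq_nil_of_length_eq_zero (by omega)
      rw [hnil]
      rfl
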